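-- pv_equiv track=rewrite | github.com/rytilahti-juuso/plaseeraus | python koodi.py | sort_data_by_table_company_size
-- ===== SOURCE A (Python) =====
-- def indexes_of_table_group(all_data, size_of_table_group):
--     items_indexes = []
--     for i in range(0, len(all_data)):
--         if(len(all_data[i][1])== size_of_table_group-1):
--
-- #            if(all_data[i][3] == False):
--             items_indexes.append(i)
-- #                all_data[i][3] = True
--
--     return items_indexes
--
-- def sort_data_by_table_company_size(all_data):
--     all_data_sorted = []
--     group_of_4 =  indexes_of_table_group(all_data, 4)
--     group_of_3 = indexes_of_table_group(all_data, 3)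
--     group_of_2 = indexes_of_table_group(all_data, 2)
--     group_of_1 = indexes_of_table_group(all_data, 1)
--     for i in range(len(group_of_4)):
--         all_data_sorted.append(all_data[group_of_4[i]])
--     for i in range(len(group_of_3)):
--         all_data_sorted.append(all_data[group_of_3[i]])
--     for i in range(len(group_of_2)):
--         all_data_sorted.append(all_data[group_of_2[i]])
--     for i in range(len(group_of_1)):
--         all_data_sorted.append(all_data[group_of_1[i]])
--     return all_data_sorted
-- ===== SOURCE B (Python) =====
-- def sort_data_by_table_company_size(all_data):
--     g3, g2, g1, g0 = [], [], [], []
--     for row in all_data: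
--         n = len(row[1])
--         if n == 3:
--             g3.append(row)
--         elif n == 2:
--             g2.append(row)
--         elif n == 1:
--             g1.append(row)
--         elif n == 0:
--             g0.append(row)
--     return g3 + g2 + g1 + g0
-- ===== Notes on version B (the rewrite author's own statement) =====
-- stated objective: simpler
-- what changed: Replaces A's four index-collecting scans plus four index-lookup append loops with a single pass that appends each row directly into one of four buckets and concatenates them.
import Mathlib
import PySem

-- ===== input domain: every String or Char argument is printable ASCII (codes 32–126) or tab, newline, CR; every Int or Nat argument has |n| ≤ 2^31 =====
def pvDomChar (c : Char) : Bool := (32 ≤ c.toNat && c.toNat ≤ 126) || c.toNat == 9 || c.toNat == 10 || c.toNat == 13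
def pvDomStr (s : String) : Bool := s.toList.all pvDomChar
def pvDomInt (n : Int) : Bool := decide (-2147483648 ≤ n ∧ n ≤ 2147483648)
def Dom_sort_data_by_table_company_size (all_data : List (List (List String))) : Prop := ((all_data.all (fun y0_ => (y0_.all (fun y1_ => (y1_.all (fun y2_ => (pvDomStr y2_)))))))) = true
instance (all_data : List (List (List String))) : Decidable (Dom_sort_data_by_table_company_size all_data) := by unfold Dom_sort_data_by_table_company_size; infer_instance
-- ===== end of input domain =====

-- B replaces A's four index-collecting scans and four index-lookup append loops by a
-- single bucketing pass (objective: simpler); return values agree wherever A returns.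

-- ===== PORT A =====
-- helper: indexes_of_table_group(all_data, size_of_table_group)
def indexes_of_table_group (all_data : List (List (List String))) (size_of_table_group : Int) : List Int :=
  (PySem.List.pyRange 0 (all_data.length : Int) 1).foldl
    (fun items_indexes i =>
      if ((PySem.List.pyGetD (PySem.List.pyGetD all_data i []) 1 []).length : Int) = size_of_table_group - 1
      then items_indexes ++ [i] else items_indexes) []

def sort_data_by_table_company_size (all_data : List (List (List String))) : List (List (List String)) :=
  let group_of_4 := indexes_of_table_group all_data 4
  let group_of_3 := indexes_of_table_group all_data 3
  let group_of_2 := indexes_of_table_group all_data 2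
  let group_of_1 := indexes_of_table_group all_data 1
  let s := (PySem.List.pyRange 0 (group_of_4.length : Int) 1).foldl
    (fun acc i => acc ++ [PySem.List.pyGetD all_data (PySem.List.pyGetD group_of_4 i 0) []]) []
  let s := (PySem.List.pyRange 0 (group_of_3.length : Int) 1).foldl
    (fun acc i => acc ++ [PySem.List.pyGetD all_data (PySem.List.pyGetD group_of_3 i 0) []]) s
  let s := (PySem.List.pyRange 0 (group_of_2.length : Int) 1).foldl
    (fun acc i => acc ++ [PySem.List.pyGetD all_data (PySem.List.pyGetD group_of_2 i 0) []]) s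
  (PySem.List.pyRange 0 (group_of_1.length : Int) 1).foldl
    (fun acc i => acc ++ [PySem.List.pyGetD all_data (PySem.List.pyGetD group_of_1 i 0) []]) s

-- ===== PORT B =====
-- B-side helpers: n = len(row[1]); the loop body of B's single bucketing pass
def pvRowLen (row : List (List String)) : Nat := (PySem.List.pyGetD row 1 []).length

def pvStep
    (b : List (List (List String)) × List (List (List String)) × List (List (List String)) × List (List (List String)))
    (row : List (List String)) :
    List (List (List String)) × List (List (List String)) × List (List (List String)) × List (List (List String)) :=
  let n := pvRowLen row
  if n = 3 then (b.1 ++ [row], b.2.1, b.2.2.1, b.2.2.2)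
  else if n = 2 then (b.1, b.2.1 ++ [row], b.2.2.1, b.2.2.2)
  else if n = 1 then (b.1, b.2.1, b.2.2.1 ++ [row], b.2.2.2)
  else if n = 0 then (b.1, b.2.1, b.2.2.1, b.2.2.2 ++ [row])
  else b

def sort_data_by_table_company_size_alt (all_data : List (List (List String))) : List (List (List String)) :=
  let b := all_data.foldl pvStep ([], [], [], [])
  b.1 ++ b.2.1 ++ b.2.2.1 ++ b.2.2.2

-- ===== PRECONDITION & SPEC =====
-- Pre_ excludes inputs where some row has fewer than 2 elements: there Python A (and B)
-- raises IndexError on row[1].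
def Pre_sort_data_by_table_company_size (all_data : List (List (List String))) : Prop :=
  ∀ row ∈ all_data, 2 ≤ row.length
instance (all_data : List (List (List String))) : Decidable (Pre_sort_data_by_table_company_size all_data) := by unfold Pre_sort_data_by_table_company_size; infer_instance

def pvWitness_sort_data_by_table_company_size : List (List (List String)) :=
  [[["a"], ["x", "y"]], [["b"], []]]

def Spec_sort_data_by_table_company_size (all_data : List (List (List String))) (out : List (List (List String))) : Prop := out = sort_data_by_table_company_size_alt all_data
instance (all_data : List (List (List String))) (out : List (List (List String))) : Decidable (Spec_sort_data_by_table_company_size all_data out) := by unfold Spec_sort_data_by_table_company_size; infer_instance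

-- ===== CLAIM (what is proved, stated in full; the proofs are below) =====
def Claim_equal_sort_data_by_table_company_size : Prop := ∀ (all_data : List (List (List String))), Dom_sort_data_by_table_company_size all_data → Pre_sort_data_by_table_company_size all_data → Spec_sort_data_by_table_company_size all_data (sort_data_by_table_company_size all_data)

-- ===== LEMMAS AND PROOFS =====

-- A's index-collecting loop is the filtered range of indices.
theorem idxGroup_eq (xs : List (List (List String))) (s : Int) :
    indexes_of_table_group xs s =
      ((List.range xs.length).filter (fun i => decide ((pvRowLen (xs.getD i []) : Int) = s - 1))).map Int.ofNat := by
  unfold indexes_of_table_group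
  rw [PySem.List.pyRange_one]
  simp only [Int.sub_zero, Int.toNat_natCast, List.foldl_map, zero_add]
  have hfun : (fun (acc : List Int) (y : Nat) =>
      if ((PySem.List.pyGetD (PySem.List.pyGetD xs (y : Int) []) 1 []).length : Int) = s - 1
      then acc ++ [(y : Int)] else acc)
      = fun (acc : List Int) (y : Nat) =>
        if (fun i => decide ((pvRowLen (xs.getD i []) : Int) = s - 1)) y = true
        then acc ++ [Int.ofNat y] else acc := by
    funext acc y
    simp [pvRowLen]
  rw [hfun, PySem.List.foldl_append_if]
  simp

-- mapping an index function over the whole range recovers the list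
theorem map_range_getD {α β : Type} (l : List α) (d : α) (f : α → β) :
    (List.range l.length).map (fun i => f (l.getD i d)) = l.map f := by
  induction l with
  | nil => simp
  | cons x t ih =>
    rw [List.length_cons, List.range_succ_eq_map]
    simp only [List.map_cons, List.map_map, List.getD_cons_zero]
    refine congrArg (f x :: ·) ?_
    have : ((fun i => f ((x :: t).getD i d)) ∘ Nat.succ) = fun i => f (t.getD i d) := by
      funext i; simp
    rw [this, ih]

-- gathering the elements at the filtered indices is filtering the list
theorem gather {α : Type} (xs : List α) (d : α) (p : α → Bool) :
    ((List.range xs.length).filter (fun i => p (xs.getD i d))).map (fun i => xs.getD i d)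
      = xs.filter p := by
  induction xs with
  | nil => simp
  | cons x t ih =>
    have hc1 : ((fun i => p ((x :: t).getD i d)) ∘ Nat.succ) = fun i => p (t.getD i d) := by
      funext i; simp
    have hc2 : ((fun i => (x :: t).getD i d) ∘ Nat.succ) = fun i => t.getD i d := by
      funext i; simp
    have hc2' : (fun i => (x :: t)[i]?.getD d) ∘ Nat.succ = fun i => t[i]?.getD d := by
      funext i; simp
    rw [List.length_cons, List.range_succ_eq_map, List.filter_cons, List.filter_map, hc1]
    by_cases h : p x
    · simp [h, hc2']
      simpa using ih
    · simp [h, hc2']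
      simpa using ih

-- A's append loop over one index group produces the filter of that group's rows.
theorem groupLoop_eq (xs : List (List (List String))) (s : Int)
    (acc : List (List (List String))) :
    (PySem.List.pyRange 0 ((indexes_of_table_group xs s).length : Int) 1).foldl
      (fun acc i => acc ++ [PySem.List.pyGetD xs (PySem.List.pyGetD (indexes_of_table_group xs s) i 0) []]) acc
      = acc ++ xs.filter (fun row => decide ((pvRowLen row : Int) = s - 1)) := by
  rw [PySem.List.pyRange_one]
  simp only [Int.sub_zero, Int.toNat_natCast, List.foldl_map, zero_add]
  rw [PySem.List.foldl_append_singleton_eq_map]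
  refine congrArg (acc ++ ·) ?_
  have h1 : (fun (y : Nat) => PySem.List.pyGetD xs (PySem.List.pyGetD (indexes_of_table_group xs s) (y : Int) 0) [])
      = fun (y : Nat) => PySem.List.pyGetD xs ((indexes_of_table_group xs s).getD y 0) [] := by
    funext y; simp
  rw [h1, map_range_getD (indexes_of_table_group xs s) (0 : Int)
    (fun j => PySem.List.pyGetD xs j []), idxGroup_eq, List.map_map]
  have h2 : ((fun j => PySem.List.pyGetD xs j []) ∘ Int.ofNat) = fun i => xs.getD i [] := by
    funext i; simp
  rw [h2]
  exact gather xs [] (fun row => decide ((pvRowLen row : Int) = s - 1))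

-- B's single pass fills each bucket with the corresponding filter.
theorem bucket_eq (xs : List (List (List String)))
    (a3 a2 a1 a0 : List (List (List String))) :
    xs.foldl pvStep (a3, a2, a1, a0)
      = (a3 ++ xs.filter (fun r => decide (pvRowLen r = 3)),
         a2 ++ xs.filter (fun r => decide (pvRowLen r = 2)),
         a1 ++ xs.filter (fun r => decide (pvRowLen r = 1)),
         a0 ++ xs.filter (fun r => decide (pvRowLen r = 0))) := by
  induction xs generalizing a3 a2 a1 a0 with
  | nil => simp
  | cons x t ih =>
    rw [List.foldl_cons]
    by_cases h3 : pvRowLen x = 3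
    · rw [show pvStep (a3, a2, a1, a0) x = (a3 ++ [x], a2, a1, a0) from by simp [pvStep, h3], ih]
      simp [h3]
    · by_cases h2 : pvRowLen x = 2
      · rw [show pvStep (a3, a2, a1, a0) x = (a3, a2 ++ [x], a1, a0) from by simp [pvStep, h2], ih]
        simp [h2]
      · by_cases h1 : pvRowLen x = 1
        · rw [show pvStep (a3, a2, a1, a0) x = (a3, a2, a1 ++ [x], a0) from by simp [pvStep, h1], ih]
          simp [h1]
        · by_cases h0 : pvRowLen x = 0
          · rw [show pvStep (a3, a2, a1, a0) x = (a3, a2, a1, a0 ++ [x]) from by simp [pvStep, h0], ih]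
            simp [h0]
          · rw [show pvStep (a3, a2, a1, a0) x = (a3, a2, a1, a0) from by simp [pvStep, h3, h2, h1, h0], ih]
            simp [h3, h2, h1, h0]

-- the Int comparison against s-1 in A is the Nat comparison against k in B
theorem filter_int_nat (xs : List (List (List String))) (s : Int) (k : Nat)
    (h : s - 1 = (k : Int)) :
    xs.filter (fun row => decide ((pvRowLen row : Int) = s - 1))
      = xs.filter (fun r => decide (pvRowLen r = k)) := by
  refine List.filter_congr ?_
  intro r _
  simp [h]

-- ===== VERDICT (by name: the statement is the Claim_ definition above) =====
theorem sort_data_by_table_company_size_spec : Claim_equal_sort_data_by_table_company_size := by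
  intro all_data _ _
  unfold Spec_sort_data_by_table_company_size
  unfold sort_data_by_table_company_size sort_data_by_table_company_size_alt
  rw [groupLoop_eq, groupLoop_eq, groupLoop_eq, groupLoop_eq, bucket_eq]
  rw [filter_int_nat all_data 4 3 (by norm_num), filter_int_nat all_data 3 2 (by norm_num),
      filter_int_nat all_data 2 1 (by norm_num), filter_int_nat all_data 1 0 (by norm_num)]
  simp
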